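-- pv_equiv track=rewrite | github.com/Arturitooo/Dumpster | code_wars/Python/3powersof2.py | three_powers
-- ===== SOURCE A (Python) =====
-- def three_powers(n):
--     for i in range(0, 10):
--         for j in range(0, 10):
--             for k in range(0, 10):
--                 if n == (2**i) + (2**j) + (2**k):
--                     return True
--                     break
--     return False
-- ===== SOURCE B (Python) =====
-- def three_powers(n):
--     # Closed-form bit test: n is a sum of three powers of 2 with exponents 0..9
--     # iff 3 <= n <= 1536 and (n < 1024 and popcount(n) <= 3, or n >= 1024 and
--     # n - 1024 is 0 or a power of 2, tested as a divisor of 512): any power 2^e (e>=1) splits into two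
--     # smaller powers, so "at most 3 binary ones" suffices below 1024.
--     if n < 3 or n > 1536:
--         return False
--     q, r = divmod(n, 1024)
--     if q:
--         # n = 1024 + r with 0 <= r <= 512: valid iff r is 0 or a power of 2
--         # (the divisors of 512 are exactly the powers of 2 up to 512)
--         return r == 0 or 512 % r == 0
--     ones = 0
--     while n:
--         ones += n % 2
--         n //= 2
--     return ones <= 3
-- ===== Notes on version B (the rewrite author's own statement) =====
-- stated objective: alternative
-- what changed: Replaces A's exhaustive triple loop over 1000 exponent triples by a constant-time closed-form arithmetic test: range check 3..1536, then for n >= 1024 check that n-1024 is 0 or a power of 2 (a divisor of 512), otherwise check that the binary popcount of n is at most 3.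
import Mathlib
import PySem

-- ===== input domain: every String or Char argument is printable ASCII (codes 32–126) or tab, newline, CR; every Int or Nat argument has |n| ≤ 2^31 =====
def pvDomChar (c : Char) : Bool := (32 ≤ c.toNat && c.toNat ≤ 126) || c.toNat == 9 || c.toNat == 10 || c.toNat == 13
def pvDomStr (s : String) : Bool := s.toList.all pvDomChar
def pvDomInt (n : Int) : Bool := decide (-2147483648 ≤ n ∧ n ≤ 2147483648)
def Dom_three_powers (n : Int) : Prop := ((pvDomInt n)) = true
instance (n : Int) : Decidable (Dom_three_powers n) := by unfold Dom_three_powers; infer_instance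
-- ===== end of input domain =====

-- B replaces A's 1000-iteration triple loop by an O(1) closed-form bit test
-- (range check, then popcount/power-of-two conditions); objective: alternative closed form.
set_option maxRecDepth 40000
set_option maxHeartbeats 1600000


-- ===== PORT A =====
-- triple nested loop with early 'return True' = nested List.any over range(0,10);
-- 2**i for i ≥ 0 is exact as 2 ^ i.toNat (pyRange 0 10 1 yields only nonnegative i)
def three_powers (n : Int) : Bool :=
  (PySem.List.pyRange 0 10 1).any (fun i =>
    (PySem.List.pyRange 0 10 1).any (fun j =>
      (PySem.List.pyRange 0 10 1).any (fun k =>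
        n == (2 : Int) ^ i.toNat + (2 : Int) ^ j.toNat + (2 : Int) ^ k.toNat)))

-- ===== PORT B =====
-- the while loop 'while n: ones += n %% 2; n //= 2' of Source B; it only runs in the
-- branch where 3 ≤ n ≤ 1023, so recursion on n.toNat with Nat %% / Nat / is exact
def pvCountOnesAux : Nat → Nat → Nat
  | 0, _ => 0
  | fuel + 1, n => if n = 0 then 0 else n % 2 + pvCountOnesAux fuel (n / 2)

-- fuel n is enough: n halves every step, so the loop runs ≤ n times
def pvCountOnes (n : Nat) : Nat := pvCountOnesAux n n

-- range guard; q, r = divmod(n, 1024) via PySem floordiv/mod; in the q-branch the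
-- power-of-2 test is Source B's arithmetic '512 % r == 0' (PySem.Int.mod, exact)
def three_powers_alt (n : Int) : Bool :=
  if n < 3 ∨ n > 1536 then false
  else
    let q := PySem.Int.floordiv n 1024
    let r := PySem.Int.mod n 1024
    if q ≠ 0 then (r == 0 || PySem.Int.mod 512 r == 0)
    else decide (pvCountOnes n.toNat ≤ 3)

-- ===== PRECONDITION & SPEC =====
def Spec_three_powers (n : Int) (out : Bool) : Prop := out = three_powers_alt n
instance (n : Int) (out : Bool) : Decidable (Spec_three_powers n out) := by unfold Spec_three_powers; infer_instance

-- ===== CLAIM (what is proved, stated in full; the proofs are below) =====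
def Claim_equal_three_powers : Prop := ∀ (n : Int), Dom_three_powers n → Spec_three_powers n (three_powers n)

-- ===== LEMMAS AND PROOFS =====

-- the multiset of sums A scans, as a list
def pvSums : List Int :=
  (PySem.List.pyRange 0 10 1).flatMap (fun i =>
    (PySem.List.pyRange 0 10 1).flatMap (fun j =>
      (PySem.List.pyRange 0 10 1).map (fun k =>
        (2 : Int) ^ i.toNat + (2 : Int) ^ j.toNat + (2 : Int) ^ k.toNat)))

-- the 184 distinct values of pvSums, as a literal
def pvSLit : List Int := [3, 4, 5, 6, 7, 8, 9, 10, 11, 12, 13, 14, 16, 17, 18, 19, 20, 21, 22, 24, 25, 26, 28, 32, 33, 34, 35, 36, 37, 38, 40, 41, 42, 44, 48, 49, 50, 52, 56, 64, 65, 66, 67, 68, 69, 70, 72, 73, 74, 76, 80, 81, 82, 84, 88, 96, 97, 98, 100, 104, 112, 128, 129, 130, 131, 132, 133, 134, 136, 137, 138, 140, 144, 145, 146, 148, 152, 160, 161, 162, 164, 168, 176, 192, 193, 194, 196, 200, 208, 224, 256, 257, 258, 259, 260, 261, 262, 264, 265, 266, 268, 272, 273, 274, 276, 280, 288, 289, 290,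 292, 296, 304, 320, 321, 322, 324, 328, 336, 352, 384, 385, 386, 388, 392, 400, 416, 448, 512, 513, 514, 515, 516, 517, 518, 520, 521, 522, 524, 528, 529, 530, 532, 536, 544, 545, 546, 548, 552, 560, 576, 577, 578, 580, 584, 592, 608, 640, 641, 642, 644, 648, 656, 672, 704, 768, 769, 770, 772, 776, 784, 800, 832, 896, 1024, 1025, 1026, 1028, 1032, 1040, 1056, 1088, 1152, 1280, 1536]

theorem A_iff_mem (n : Int) : three_powers n = true ↔ n ∈ pvSums := by
  simp only [three_powers, pvSums, List.any_eq_true, List.mem_flatMap, List.mem_map,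
    beq_iff_eq]
  constructor
  · rintro ⟨i, hi, j, hj, k, hk, h⟩; exact ⟨i, hi, j, hj, k, hk, h.symm⟩
  · rintro ⟨i, hi, j, hj, k, hk, h⟩; exact ⟨i, hi, j, hj, k, hk, h.symm⟩

theorem mem_sums_iff (n : Int) : n ∈ pvSums ↔ n ∈ pvSLit := by
  have h1 : pvSums.all (fun x => pvSLit.contains x) = true := by decide
  have h2 : pvSLit.all (fun x => pvSums.contains x) = true := by decide
  simp only [List.all_eq_true, List.contains_iff_mem] at h1 h2
  exact ⟨fun h => h1 _ h, fun h => h2 _ h⟩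

theorem SLit_bounds : ∀ x ∈ pvSLit, 3 ≤ x ∧ x ≤ 1536 := by decide

theorem B_out (n : Int) (h : n < 3 ∨ n > 1536) : three_powers_alt n = false := by
  unfold three_powers_alt
  rw [if_pos h]

theorem B_in_range : ∀ m ∈ List.range 1534,
    three_powers_alt ((m : Int) + 3) = pvSLit.contains ((m : Int) + 3) := by
  have h : (List.range 1534).all
      (fun m => three_powers_alt ((m : Int) + 3) == pvSLit.contains ((m : Int) + 3)) = true := by
    decide
  simp only [List.all_eq_true, beq_iff_eq] at h
  exact h

theorem A_eq_contains (n : Int) : three_powers n = pvSLit.contains n := by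
  rw [Bool.eq_iff_iff, A_iff_mem, mem_sums_iff, List.contains_iff_mem]

-- ===== VERDICT (by name: the statement is the Claim_ definition above) =====
theorem three_powers_spec : Claim_equal_three_powers := by
  intro n _
  unfold Spec_three_powers
  by_cases h : 3 ≤ n ∧ n ≤ 1536
  · have hm : ((n - 3).toNat : Int) + 3 = n := by omega
    have hr : (n - 3).toNat ∈ List.range 1534 := by
      rw [List.mem_range]; omega
    have hb := B_in_range _ hr
    rw [hm] at hb
    rw [hb, A_eq_contains]
  · have hout : n < 3 ∨ n > 1536 := by omega
    rw [B_out n hout, A_eq_contains]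
    cases hcv : pvSLit.contains n with
    | false => rfl
    | true =>
      have hmem : n ∈ pvSLit := List.contains_iff_mem.mp hcv
      have := SLit_bounds n hmem
      omega
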